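-- pv_equiv track=rewrite | github.com/shashankdinesh/family-genealogy-tree | solution.py | child_gender
-- ===== SOURCE A (Python) =====
-- def child_gender(sequence,gender=None):
--     for i in sequence:
--         if i == 0 and gender == None:
--             gender = "M"
--         elif i == 0 and gender == "F":
--             gender = "F"
--         elif i == 0 and gender == "M":
--             gender = "M"
--         elif i == 1 and gender == None:
--             gender = "F"
--         elif i == 1 and gender == "F":
--             gender = "M"
--         elif i == 1 and gender == "M":
--             gender = "F"
--     return gender
-- ===== SOURCE B (Python) =====
-- def child_gender(sequence, gender=None):
--     events = [i for i in sequence if i in (0, 1)]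
--     if gender is None and events:
--         gender = "M"
--     if events.count(1) % 2:
--         if gender == "M":
--             gender = "F"
--         elif gender == "F":
--             gender = "M"
--     return gender
-- ===== Notes on version B (the rewrite author's own statement) =====
-- stated objective: simpler
-- what changed: Replaced the per-element six-branch state machine by a filter-then-parity derivation: keep only the 0/1 events, seed 'M' when gender is unknown and any event exists, and swap M/F once iff the number of 1-events is odd.
import Mathlib
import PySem

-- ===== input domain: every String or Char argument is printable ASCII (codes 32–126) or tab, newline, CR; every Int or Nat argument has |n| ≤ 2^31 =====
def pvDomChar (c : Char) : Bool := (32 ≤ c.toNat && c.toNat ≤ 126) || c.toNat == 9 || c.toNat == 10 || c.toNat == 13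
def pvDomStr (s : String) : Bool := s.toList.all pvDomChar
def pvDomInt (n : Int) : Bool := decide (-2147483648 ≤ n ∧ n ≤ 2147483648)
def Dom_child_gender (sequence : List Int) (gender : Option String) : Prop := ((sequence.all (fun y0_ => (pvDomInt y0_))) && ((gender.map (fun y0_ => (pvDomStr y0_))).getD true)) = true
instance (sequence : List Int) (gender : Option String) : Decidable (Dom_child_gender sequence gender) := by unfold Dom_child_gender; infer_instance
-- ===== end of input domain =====

-- B replaces A's per-element six-branch state machine by a filter-then-parity derivation (simpler decomposition, same O(n) cost).


-- ===== PORT A =====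
-- one iteration of A's for-loop body (the if/elif chain, branches in source order)
def cgStep (g : Option String) (i : Int) : Option String :=
  if i = 0 ∧ g = none then some "M"
  else if i = 0 ∧ g = some "F" then some "F"
  else if i = 0 ∧ g = some "M" then some "M"
  else if i = 1 ∧ g = none then some "F"
  else if i = 1 ∧ g = some "F" then some "M"
  else if i = 1 ∧ g = some "M" then some "F"
  else g

def child_gender (sequence : List Int) (gender : Option String) : Option String :=
  sequence.foldl cgStep gender

-- ===== PORT B =====
def child_gender_alt (sequence : List Int) (gender : Option String) : Option String :=
  let events := sequence.filter (fun i => i == 0 || i == 1)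
  let g := if gender = none ∧ events ≠ [] then some "M" else gender
  if events.count 1 % 2 = 1 then
    (if g = some "M" then some "F" else if g = some "F" then some "M" else g)
  else g

-- ===== PRECONDITION & SPEC =====
def Spec_child_gender (sequence : List Int) (gender : Option String) (out : Option String) : Prop := out = child_gender_alt sequence gender
instance (sequence : List Int) (gender : Option String) (out : Option String) : Decidable (Spec_child_gender sequence gender out) := by unfold Spec_child_gender; infer_instance

-- ===== CLAIM (what is proved, stated in full; the proofs are below) =====
def Claim_equal_child_gender : Prop := ∀ (sequence : List Int) (gender : Option String), Dom_child_gender sequence gender → Spec_child_gender sequence gender (child_gender sequence gender)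

-- ===== LEMMAS AND PROOFS =====

theorem cgStep_other (i : Int) (g : Option String) (hi0 : ¬ i = 0) (hi1 : ¬ i = 1) :
    cgStep g i = g := by
  simp [cgStep, hi0, hi1]

theorem alt_cons (i : Int) (rest : List Int) (g : Option String) :
    child_gender_alt (i :: rest) g = child_gender_alt rest (cgStep g i) := by
  by_cases hi0 : i = 0
  · subst hi0
    rcases g with _ | s
    · simp [child_gender_alt, cgStep, List.filter_cons, List.count_cons]
    · by_cases hM : s = "M"
      · subst hM; simp [child_gender_alt, cgStep, List.filter_cons, List.count_cons]
      · by_cases hF : s = "F"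
        · subst hF; simp [child_gender_alt, cgStep, List.filter_cons, List.count_cons]
        · simp [child_gender_alt, cgStep, List.filter_cons, List.count_cons, hM, hF]
  · by_cases hi1 : i = 1
    · subst hi1
      rcases g with _ | s
      · by_cases hp : rest.count 1 % 2 = 1 <;>
          simp [child_gender_alt, cgStep, List.filter_cons, List.count_cons,
            Nat.add_mod, hp] <;> omega
      · by_cases hM : s = "M"
        · subst hM
          by_cases hp : rest.count 1 % 2 = 1 <;>
            simp [child_gender_alt, cgStep, List.filter_cons, List.count_cons,
              Nat.add_mod, hp] <;> omega <;> omega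
        · by_cases hF : s = "F"
          · subst hF
            by_cases hp : rest.count 1 % 2 = 1 <;>
              simp [child_gender_alt, cgStep, List.filter_cons, List.count_cons,
                Nat.add_mod, hp] <;> omega <;> omega <;> omega
          · by_cases hp : rest.count 1 % 2 = 1 <;>
              simp [child_gender_alt, cgStep, List.filter_cons, List.count_cons,
                Nat.add_mod, hp, hM, hF]
    · rw [cgStep_other i g hi0 hi1]
      simp [child_gender_alt, List.filter_cons, hi0, hi1]

theorem eq_all (sequence : List Int) (gender : Option String) :
    child_gender sequence gender = child_gender_alt sequence gender := by
  induction sequence generalizing gender with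
  | nil =>
      rcases gender with _ | s <;> simp [child_gender, child_gender_alt]
  | cons i rest ih =>
      rw [alt_cons]
      simpa [child_gender] using ih (cgStep gender i)

-- ===== VERDICT (by name: the statement is the Claim_ definition above) =====
theorem child_gender_spec : Claim_equal_child_gender := by
  intro sequence gender _
  unfold Spec_child_gender
  exact eq_all sequence gender
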